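-- pv_equiv track=rewrite | github.com/tobeymathis/chomp |  chomp_testing_v2.1.py | get_boards
-- ===== SOURCE A (Python) =====
-- def get_boards(max_height: int, max_width: int, position: int = 0) -> list:
--     checked_lists = []
--     if position == max_width - 1:
--         checked_lists = [[i] for i in range(0, max_height + 1)]
--         return checked_lists
--     for i in range(max_height + 1):
--         sub_boards = get_boards(i, max_width, position + 1)
--         for sub_board in sub_boards:
--             checked_lists.append([i] + sub_board)
--
--     return checked_lists
-- ===== SOURCE B (Python) =====
-- def get_boards(max_height: int, max_width: int, position: int = 0) -> list:
--     # Iterative bottom-up DP: col[h] = all non-increasing boards for the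
--     # remaining columns when the previous column height is h.
--     if max_height < 0:
--         return []
--     col = [[[i] for i in range(h + 1)] for h in range(max_height + 1)]
--     for _ in range(max_width - 1 - position):
--         new_col = []
--         prev = []
--         for h, entry in enumerate(col):
--             prev = prev + [[h] + s for s in entry]
--             new_col.append(prev)
--         col = new_col
--     return col[-1]  # col is nonempty here
-- ===== Notes on version B (the rewrite author's own statement) =====
-- stated objective: alternative
-- what changed: Replaced A's branching recursion (which recomputes get_boards(i, ..., position+1) afresh for every i at every level) by an iterative bottom-up dynamic-programming table over column positions, sharing each sub-result across all larger heights.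
import Mathlib
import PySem

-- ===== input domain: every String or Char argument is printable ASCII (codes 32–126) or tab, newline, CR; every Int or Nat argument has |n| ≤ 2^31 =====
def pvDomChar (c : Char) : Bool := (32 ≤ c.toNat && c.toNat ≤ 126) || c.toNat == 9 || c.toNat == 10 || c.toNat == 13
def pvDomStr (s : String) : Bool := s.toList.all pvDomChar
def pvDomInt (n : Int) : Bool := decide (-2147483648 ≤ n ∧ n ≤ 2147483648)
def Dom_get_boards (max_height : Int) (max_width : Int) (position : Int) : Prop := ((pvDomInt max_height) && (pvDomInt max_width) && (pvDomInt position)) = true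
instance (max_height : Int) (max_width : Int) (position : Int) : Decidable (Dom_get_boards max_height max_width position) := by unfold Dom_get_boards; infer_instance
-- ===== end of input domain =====

-- B replaces A's branching recursion by an iterative bottom-up DP table over column positions (alternative decomposition, same output).

-- ===== PORT A =====
-- Fuel-indexed transliteration of A's recursion; fuel only matters outside Pre_ (where Python A hits RecursionError).
def get_boardsA : Nat → Int → Int → Int → List (List Int)
  | 0, _, _, _ => []
  | fuel+1, max_height, max_width, position =>
    if position = max_width - 1 then
      (PySem.List.pyRange 0 (max_height + 1) 1).map (fun i => [i])
    else
      (PySem.List.pyRange 0 (max_height + 1) 1).foldl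
        (fun checked_lists i =>
          checked_lists ++ (get_boardsA fuel i max_width (position + 1)).map (fun sub_board => i :: sub_board))
        []

def get_boards (max_height : Int) (max_width : Int) (position : Int) : List (List Int) :=
  get_boardsA ((max_width - position).toNat + 1) max_height max_width position

-- ===== PORT B =====
def get_boards_alt (max_height : Int) (max_width : Int) (position : Int) : List (List Int) :=
  if max_height < 0 then [] else
  let col0 : List (List (List Int)) :=
    (PySem.List.pyRange 0 (max_height + 1) 1).map
      (fun h => (PySem.List.pyRange 0 (h + 1) 1).map (fun i => [i]))
  let col :=
    (List.range (max_width - 1 - position).toNat).foldl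
      (fun col _ =>
        ((PySem.List.enumerate col).foldl
          (fun (st : List (List (List Int)) × List (List Int)) he =>
            let prev := st.2 ++ he.2.map (fun s => he.1 :: s)
            (st.1 ++ [prev], prev))
          ([], [])).1)
      col0
  (col.getLast?).getD []  -- col[-1]; col is nonempty here

-- ===== PRECONDITION & SPEC =====
-- A returns normally except when position ≥ max_width with max_height ≥ 0 (unbounded recursion → RecursionError).
def Pre_get_boards (max_height : Int) (max_width : Int) (position : Int) : Prop :=
  position < max_width ∨ max_height < 0
instance (max_height : Int) (max_width : Int) (position : Int) : Decidable (Pre_get_boards max_height max_width position) := by unfold Pre_get_boards; infer_instance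

def pvWitness_get_boards : Int × Int × Int := (3, 3, 0)

def Spec_get_boards (max_height : Int) (max_width : Int) (position : Int) (out : List (List Int)) : Prop := out = get_boards_alt max_height max_width position
instance (max_height : Int) (max_width : Int) (position : Int) (out : List (List Int)) : Decidable (Spec_get_boards max_height max_width position out) := by unfold Spec_get_boards; infer_instance

-- ===== CLAIM (what is proved, stated in full; the proofs are below) =====
def Claim_equal_get_boards : Prop := ∀ (max_height : Int) (max_width : Int) (position : Int), Dom_get_boards max_height max_width position → Pre_get_boards max_height max_width position → Spec_get_boards max_height max_width position (get_boards max_height max_width position)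

-- ===== LEMMAS AND PROOFS =====

-- Reference function: G k h = boards with k+1 columns, first column height ≤ h, in A's order.
def G : Nat → Int → List (List Int)
  | 0, mh => (PySem.List.pyRange 0 (mh + 1) 1).map (fun i => [i])
  | k+1, mh => (PySem.List.pyRange 0 (mh + 1) 1).foldl
      (fun acc i => acc ++ (G k i).map (fun s => i :: s)) []

lemma G_neg (k : Nat) (mh : Int) (h : mh < 0) : G k mh = [] := by
  cases k <;> simp [G, PySem.List.pyRange_one_eq_nil (by omega : mh + 1 ≤ 0)]

lemma G_succ_right (k : Nat) (n : Int) (hn : 0 ≤ n) :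
    G (k+1) n = G (k+1) (n-1) ++ (G k n).map (fun s => n :: s) := by
  show (PySem.List.pyRange 0 (n + 1) 1).foldl _ [] = _
  rw [PySem.List.pyRange_one_succ_right (by omega : (0:Int) ≤ n), List.foldl_append]
  simp [G, show n - 1 + 1 = n from by ring]

-- A's fuelled recursion computes G when the fuel covers the remaining width.
lemma get_boardsA_eq_G : ∀ (fuel : Nat) (mh mw pos : Int),
    pos ≤ mw - 1 → (mw - 1 - pos).toNat < fuel →
    get_boardsA fuel mh mw pos = G (mw - 1 - pos).toNat mh := by
  intro fuel
  induction fuel with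
  | zero => intro _ _ _ _ h; omega
  | succ fuel ih =>
    intro mh mw pos hle hfuel
    by_cases hbase : pos = mw - 1
    · have : (mw - 1 - pos).toNat = 0 := by omega
      rw [this]
      simp [get_boardsA, hbase, G]
    · have hlt : pos < mw - 1 := by omega
      have hn : (mw - 1 - pos).toNat = (mw - 1 - (pos + 1)).toNat + 1 := by omega
      rw [hn]
      have hbody : (fun (acc : List (List Int)) (i : Int) =>
            acc ++ (get_boardsA fuel i mw (pos + 1)).map (fun sub_board => i :: sub_board))
          = (fun acc i => acc ++ (G (mw - 1 - (pos + 1)).toNat i).map (fun s => i :: s)) := by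
        funext acc i
        rw [ih i mw (pos + 1) (by omega) (by omega)]
      simp only [get_boardsA, if_neg hbase, hbody, G]

-- One DP step of B turns the column table for k steps into the table for k+1 steps.
lemma step_eq_G (k : Nat) : ∀ (n : Int), 0 ≤ n →
    ((PySem.List.enumerate ((PySem.List.pyRange 0 n 1).map (G k))).foldl
      (fun (st : List (List (List Int)) × List (List Int)) he =>
        let prev := st.2 ++ he.2.map (fun s => he.1 :: s)
        (st.1 ++ [prev], prev))
      ([], []))
    = ((PySem.List.pyRange 0 n 1).map (G (k+1)), G (k+1) (n-1)) := by
  intro n hn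
  induction n, hn using Int.le_induction with
  | base =>
      rw [PySem.List.pyRange_one_eq_nil (by omega : (0:Int) ≤ 0)]
      simp [PySem.List.enumerate_nil, G_neg k.succ (-1) (by omega), show (0:Int) - 1 = -1 from by ring]
  | succ n hn ih =>
      rw [PySem.List.pyRange_one_succ_right (by omega : (0:Int) ≤ n), List.map_append,
        PySem.List.enumerate_append, List.foldl_append, ih]
      have hlen : ((0:Int) + ((PySem.List.pyRange 0 n 1).map (G k)).length) = n := by
        simp [PySem.List.length_pyRange_one]; omega
      rw [hlen]
      simp only [List.map_cons, List.map_nil, PySem.List.enumerate_cons, PySem.List.enumerate_nil,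
        List.foldl_cons, List.foldl_nil]
      rw [show n + 1 - 1 = n from by ring, G_succ_right k n hn]
      simp
      exact (G_succ_right k n hn).symm

-- B's outer loop iterated K times yields the column table for K steps.
lemma loop_eq_G (mh : Int) (K : Nat) :
    (List.range K).foldl
      (fun col _ =>
        ((PySem.List.enumerate col).foldl
          (fun (st : List (List (List Int)) × List (List Int)) he =>
            let prev := st.2 ++ he.2.map (fun s => he.1 :: s)
            (st.1 ++ [prev], prev))
          ([], [])).1)
      ((PySem.List.pyRange 0 (mh + 1) 1).map (fun h => (PySem.List.pyRange 0 (h + 1) 1).map (fun i => [i])))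
    = (PySem.List.pyRange 0 (mh + 1) 1).map (G K) := by
  by_cases hmh : mh < 0
  · rw [PySem.List.pyRange_one_eq_nil (by omega : mh + 1 ≤ 0)]
    simp only [List.map_nil]
    induction K with
    | zero => simp
    | succ K ihK => rw [List.range_succ, List.foldl_append, ihK]; simp [PySem.List.enumerate_nil]
  · have h0 : (0:Int) ≤ mh + 1 := by omega
    induction K with
    | zero =>
        simp only [List.range_zero, List.foldl_nil]
        rfl
    | succ K ihK =>
        rw [List.range_succ, List.foldl_append, ihK]
        simp only [List.foldl_cons, List.foldl_nil]
        rw [step_eq_G K (mh + 1) h0]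

lemma getLast_map_G (K : Nat) (mh : Int) (hmh : 0 ≤ mh) :
    ((PySem.List.pyRange 0 (mh + 1) 1).map (G K)).getLast?.getD [] = G K mh := by
  rw [PySem.List.pyRange_one_succ_right (by omega : (0:Int) ≤ mh), List.map_append]
  simp

lemma alt_eq_G (mh mw pos : Int) (hmh : 0 ≤ mh) :
    get_boards_alt mh mw pos = G (mw - 1 - pos).toNat mh := by
  unfold get_boards_alt
  rw [if_neg (by omega : ¬ mh < 0)]
  simp only [loop_eq_G mh (mw - 1 - pos).toNat]
  rw [getLast_map_G _ mh hmh]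

lemma alt_neg (mh mw pos : Int) (hmh : mh < 0) :
    get_boards_alt mh mw pos = [] := by
  unfold get_boards_alt
  rw [if_pos hmh]

lemma A_neg (mh mw pos : Int) (hmh : mh < 0) :
    get_boards mh mw pos = [] := by
  show get_boardsA _ _ _ _ = []
  by_cases hbase : pos = mw - 1 <;>
    simp [get_boardsA, hbase, PySem.List.pyRange_one_eq_nil (by omega : mh + 1 ≤ 0)]

-- ===== VERDICT (by name: the statement is the Claim_ definition above) =====
theorem get_boards_spec : Claim_equal_get_boards := by
  intro mh mw pos _ hpre
  unfold Spec_get_boards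
  by_cases hmh : mh < 0
  · rw [A_neg mh mw pos hmh, alt_neg mh mw pos hmh]
  · have hpos : pos < mw := by
      rcases hpre with h | h
      · exact h
      · omega
    rw [alt_eq_G mh mw pos (by omega)]
    exact get_boardsA_eq_G _ mh mw pos (by omega) (by omega)
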